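-- pv_equiv track=rewrite | github.com/antontomusiak/TopCoder | srm669/live_concert.py | maxHappiness
-- ===== SOURCE A (Python) =====
-- def maxHappiness(h, s):
-- 	h_s = [(h[i], s[i]) for i in range(len(h))]
-- 	h_s.sort(key=lambda x: x[0], reverse = True)
-- 	met = []
-- 	happiness = 0
-- 	for i in range(len(h)):
-- 		if h_s[i][1] not in met:
-- 			happiness += h_s[i][0]
-- 			met.append(h_s[i][1])
--
-- 	return happiness
-- ===== SOURCE B (Python) =====
-- def maxHappiness(h, s):
--     best = {}
--     for hp, sg in zip(h, s):
--         best[sg] = hp if sg not in best else max(best[sg], hp)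
--     return sum(best.values())
-- ===== Notes on version B (the rewrite author's own statement) =====
-- stated objective: faster
-- what changed: Replaced A's build-pairs + descending sort + greedy scan with a linear 'met' membership list by a single pass over zip(h, s) building a dict singer -> max happiness and summing its values.
import Mathlib
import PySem

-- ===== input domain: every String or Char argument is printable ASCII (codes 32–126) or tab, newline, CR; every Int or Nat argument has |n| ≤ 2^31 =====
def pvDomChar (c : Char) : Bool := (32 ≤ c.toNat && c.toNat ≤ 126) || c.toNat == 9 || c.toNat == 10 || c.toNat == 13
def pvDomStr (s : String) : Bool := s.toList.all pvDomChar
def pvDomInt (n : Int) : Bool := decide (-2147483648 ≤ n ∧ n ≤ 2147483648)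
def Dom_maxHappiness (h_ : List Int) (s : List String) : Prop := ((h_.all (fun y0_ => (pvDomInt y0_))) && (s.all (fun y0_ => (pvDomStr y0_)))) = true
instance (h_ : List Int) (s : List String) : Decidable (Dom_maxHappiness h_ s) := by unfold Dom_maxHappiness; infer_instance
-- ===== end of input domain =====

-- B replaces A's sort-then-greedy-scan (with a linear 'met' membership list) by a single
-- pass building a dict singer -> max happiness and summing its values (objective: faster).

-- ===== PORT A =====
def maxHappiness (h_ : List Int) (s : List String) : Int :=
  let h_s := (PySem.List.pyRange 0 (PySem.List.len h_) 1).map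
      (fun i => (PySem.List.pyGetD h_ i 0, PySem.List.pyGetD s i ""))
  let h_s := PySem.List.sorted h_s (fun x => x.1) true
  let r := (PySem.List.pyRange 0 (PySem.List.len h_) 1).foldl
      (fun (st : List String × Int) i =>
        let p := PySem.List.pyGetD h_s i (0, "")
        if p.2 ∈ st.1 then st else (st.1 ++ [p.2], st.2 + p.1))
      (([] : List String), (0 : Int))
  r.2

-- ===== PORT B =====
def maxHappiness_alt (h_ : List Int) (s : List String) : Int :=
  ((h_.zip s).foldl
    (fun (best : PySem.Dict String Int) p =>
      best.insert p.2 (if best.contains p.2 = false then p.1 else max (best.getD p.2 0) p.1))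
    PySem.Dict.empty).values.sum

-- ===== PRECONDITION & SPEC =====
-- A indexes s[i] for every i < len(h_), so it raises IndexError iff len(s) < len(h_).
def Pre_maxHappiness (h_ : List Int) (s : List String) : Prop := h_.length ≤ s.length
instance (h_ : List Int) (s : List String) : Decidable (Pre_maxHappiness h_ s) := by unfold Pre_maxHappiness; infer_instance
def pvWitness_maxHappiness : List Int × List String := ([3, -1, 3], ["a", "b", "a"])

def Spec_maxHappiness (h_ : List Int) (s : List String) (out : Int) : Prop := out = maxHappiness_alt h_ s
instance (h_ : List Int) (s : List String) (out : Int) : Decidable (Spec_maxHappiness h_ s out) := by unfold Spec_maxHappiness; infer_instance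

-- ===== CLAIM (what is proved, stated in full; the proofs are below) =====
def Claim_equal_maxHappiness : Prop := ∀ (h_ : List Int) (s : List String), Dom_maxHappiness h_ s → Pre_maxHappiness h_ s → Spec_maxHappiness h_ s (maxHappiness h_ s)

-- ===== LEMMAS AND PROOFS =====

-- the running "max happiness seen so far for singer g" accumulator, as B's dict maintains it
def pvStepM (g : String) (o : Option Int) (p : Int × String) : Option Int :=
  if p.2 = g then some (match o with | none => p.1 | some m => max m p.1) else o

def pvMax? (L : List (Int × String)) (g : String) : Option Int := L.foldl (pvStepM g) none

-- m is the maximum happiness of singer g in L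
def pvIsMax (L : List (Int × String)) (g : String) (m : Int) : Prop :=
  (m, g) ∈ L ∧ ∀ p ∈ L, p.2 = g → p.1 ≤ m

lemma pvIsMax_unique {L g m m'} (h1 : pvIsMax L g m) (h2 : pvIsMax L g m') : m = m' :=
  le_antisymm (h2.2 _ h1.1 rfl) (h1.2 _ h2.1 rfl)

lemma pvFold_some (g : String) (L : List (Int × String)) : ∀ c, ∃ m,
    L.foldl (pvStepM g) (some c) = some m ∧ c ≤ m ∧ (m = c ∨ (m, g) ∈ L) ∧
    ∀ p ∈ L, p.2 = g → p.1 ≤ m := by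
  induction L with
  | nil => exact fun c => ⟨c, rfl, le_refl _, Or.inl rfl, by simp⟩
  | cons p rest ih =>
    intro c
    by_cases hg : p.2 = g
    · obtain ⟨m, hm, hle, hmem, hbd⟩ := ih (max c p.1)
      refine ⟨m, ?_, le_trans (le_max_left _ _) hle, ?_, ?_⟩
      · rw [List.foldl_cons]; simp only [pvStepM, if_pos hg]; exact hm
      · rcases hmem with h | h
        · rcases max_choice c p.1 with hc | hc
          · exact Or.inl (h.trans hc)
          · refine Or.inr (List.mem_cons.2 (Or.inl ?_))
            rw [h.trans hc, ← hg]
        · exact Or.inr (List.mem_cons_of_mem _ h)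
      · intro q hq hq2
        rcases List.mem_cons.1 hq with rfl | hq'
        · exact le_trans (le_max_right c q.1) hle
        · exact hbd q hq' hq2
    · obtain ⟨m, hm, hle, hmem, hbd⟩ := ih c
      refine ⟨m, ?_, hle, ?_, ?_⟩
      · rw [List.foldl_cons]; simp only [pvStepM, if_neg hg]; exact hm
      · exact hmem.imp id (List.mem_cons_of_mem _)
      · intro q hq hq2
        rcases List.mem_cons.1 hq with rfl | hq'
        · exact absurd hq2 hg
        · exact hbd q hq' hq2

lemma pvMax?_some_isMax {L : List (Int × String)} {g m} (h : pvMax? L g = some m) :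
    pvIsMax L g m := by
  induction L with
  | nil => simp [pvMax?] at h
  | cons p rest ih =>
    by_cases hg : p.2 = g
    · unfold pvMax? at h
      rw [List.foldl_cons] at h
      simp only [pvStepM, if_pos hg] at h
      obtain ⟨m', hm', hle, hmem, hbd⟩ := pvFold_some g rest p.1
      rw [hm'] at h
      obtain rfl : m' = m := Option.some.inj h
      constructor
      · rcases hmem with rfl | hmem
        · refine List.mem_cons.2 (Or.inl ?_)
          rw [← hg]
        · exact List.mem_cons_of_mem _ hmem
      · intro q hq hq2
        rcases List.mem_cons.1 hq with rfl | hq'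
        · exact hle
        · exact hbd q hq' hq2
    · unfold pvMax? at h
      rw [List.foldl_cons] at h
      simp only [pvStepM, if_neg hg] at h
      obtain ⟨hmem, hbd⟩ := ih h
      refine ⟨List.mem_cons_of_mem _ hmem, ?_⟩
      intro q hq hq2
      rcases List.mem_cons.1 hq with rfl | hq'
      · exact absurd hq2 hg
      · exact hbd q hq' hq2

lemma pvMax?_none_iff {L : List (Int × String)} {g} :
    pvMax? L g = none ↔ g ∉ L.map (·.2) := by
  induction L with
  | nil => simp [pvMax?]
  | cons p rest ih =>
    by_cases hg : p.2 = g
    · unfold pvMax?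
      rw [List.foldl_cons]
      simp only [pvStepM, hg, if_pos]
      obtain ⟨m, hm, _⟩ := pvFold_some g rest p.1
      rw [hm]
      simp [hg]
    · unfold pvMax? at ih ⊢
      rw [List.foldl_cons]
      simp only [pvStepM, hg, if_neg, not_false_iff]
      rw [ih]
      simp [Ne.symm hg]

lemma pvIsMax_max? {L : List (Int × String)} {g m} (h : pvIsMax L g m) :
    pvMax? L g = some m := by
  cases hv : pvMax? L g with
  | none =>
    exfalso
    have := pvMax?_none_iff.1 hv
    exact this (List.mem_map.2 ⟨(m, g), h.1, rfl⟩)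
  | some m' => rw [pvIsMax_unique (pvMax?_some_isMax hv) h]

lemma pvMax?_perm {L L' : List (Int × String)} (hp : L.Perm L') (g : String) :
    pvMax? L g = pvMax? L' g := by
  cases hv : pvMax? L g with
  | none =>
    symm
    rw [pvMax?_none_iff] at hv ⊢
    exact fun hmem => hv ((hp.map (·.2)).mem_iff.2 hmem)
  | some m =>
    obtain ⟨hmem, hbd⟩ := pvMax?_some_isMax hv
    symm
    exact pvIsMax_max? ⟨hp.mem_iff.1 hmem, fun p hq => hbd p (hp.mem_iff.2 hq)⟩

-- value of singer g (the max of its happiness values; 0 if g never occurs — never used then)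
def pvF (L : List (Int × String)) (g : String) : Int := (pvMax? L g).getD 0

-- ===== B side =====

lemma pvB_get? (L : List (Int × String)) : ∀ (d : PySem.Dict String Int) (g : String),
    (L.foldl (fun (best : PySem.Dict String Int) p =>
      best.insert p.2 (if best.contains p.2 = false then p.1 else max (best.getD p.2 0) p.1)) d).get? g
    = L.foldl (pvStepM g) (d.get? g) := by
  induction L with
  | nil => intro d g; rfl
  | cons p rest ih =>
    intro d g
    rw [List.foldl_cons, List.foldl_cons, ih]
    congr 1
    rw [PySem.Dict.get?_insert]
    by_cases hg : g = p.2
    · subst hg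
      rw [if_pos rfl]
      unfold pvStepM
      rw [if_pos rfl]
      rw [PySem.Dict.contains_eq_isSome_get?, PySem.Dict.getD_eq_get?_getD]
      cases d.get? p.2 with
      | none => simp
      | some m => simp
    · rw [if_neg hg]
      unfold pvStepM
      rw [if_neg (fun h => hg h.symm)]

lemma pvB_keys (L : List (Int × String)) :
    (L.foldl (fun (best : PySem.Dict String Int) p =>
      best.insert p.2 (if best.contains p.2 = false then p.1 else max (best.getD p.2 0) p.1))
      PySem.Dict.empty).keys = PySem.Set.ofList (L.map (·.2)) := by
  rw [PySem.Dict.keys_foldl_insert_key L (·.2)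
    (fun best p => if best.contains p.2 = false then p.1 else max (best.getD p.2 0) p.1)
    PySem.Dict.empty]
  rw [PySem.Dict.keys_empty, PySem.Set.update_nil_left]

lemma pvB_sum (L : List (Int × String)) :
    (L.foldl (fun (best : PySem.Dict String Int) p =>
      best.insert p.2 (if best.contains p.2 = false then p.1 else max (best.getD p.2 0) p.1))
      PySem.Dict.empty).values.sum
    = ((PySem.Set.ofList (L.map (·.2))).map (pvF L)).sum := by
  set d := L.foldl (fun (best : PySem.Dict String Int) p =>
      best.insert p.2 (if best.contains p.2 = false then p.1 else max (best.getD p.2 0) p.1))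
      PySem.Dict.empty with hd
  have hnd : d.keys.Nodup := by
    rw [hd]
    exact PySem.Dict.nodup_keys_foldl_insert_key L (·.2) _ PySem.Dict.empty (by simp)
  rw [PySem.Dict.values_eq_map_keys d hnd 0]
  have hk : d.keys = PySem.Set.ofList (L.map (·.2)) := by rw [hd]; exact pvB_keys L
  rw [hk]
  congr 1
  apply List.map_congr_left
  intro g hg
  rw [PySem.Dict.getD_eq_get?_getD, hd, pvB_get? L PySem.Dict.empty g]
  rfl

-- ===== A side =====

-- the new singers A's greedy scan meets, in order
def pvNews : List (Int × String) → List String → List String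
  | [], _ => []
  | p :: rest, met => if p.2 ∈ met then pvNews rest met else p.2 :: pvNews rest (met ++ [p.2])

lemma pvNews_cons (p : Int × String) (rest : List (Int × String)) (met : List String) :
    pvNews (p :: rest) met
    = if p.2 ∈ met then pvNews rest met else p.2 :: pvNews rest (met ++ [p.2]) := rfl

lemma pvNews_mem (P : List (Int × String)) : ∀ met g,
    g ∈ pvNews P met ↔ g ∈ P.map (·.2) ∧ g ∉ met := by
  induction P with
  | nil => simp [pvNews]
  | cons p rest ih =>
    intro met g
    unfold pvNews
    by_cases hm : p.2 ∈ met
    · rw [if_pos hm, ih]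
      by_cases hg : g = p.2
      · subst hg; simp [hm]
      · simp [hg]
    · rw [if_neg hm]
      by_cases hg : g = p.2
      · subst hg; simp [hm]
      · simp [hg, ih]

lemma pvNews_nodup (P : List (Int × String)) : ∀ met, (pvNews P met).Nodup := by
  induction P with
  | nil => intro _; simp [pvNews]
  | cons p rest ih =>
    intro met
    unfold pvNews
    by_cases hm : p.2 ∈ met
    · rw [if_pos hm]; exact ih met
    · rw [if_neg hm]
      refine List.nodup_cons.2 ⟨?_, ih _⟩
      intro hc
      exact ((pvNews_mem rest (met ++ [p.2]) p.2).1 hc).2 (by simp)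

lemma pvA_loop (P : List (Int × String)) (hP : P.Pairwise (fun a b => b.1 ≤ a.1)) :
    ∀ met hap,
    (P.foldl (fun (st : List String × Int) p =>
        if p.2 ∈ st.1 then st else (st.1 ++ [p.2], st.2 + p.1)) (met, hap)).2
    = hap + ((pvNews P met).map (pvF P)).sum := by
  induction P with
  | nil => intro met hap; simp [pvNews]
  | cons p rest ih =>
    intro met hap
    have hP' := (List.pairwise_cons.1 hP).2
    have hhd := (List.pairwise_cons.1 hP).1
    rw [List.foldl_cons, pvNews_cons]
    by_cases hm : p.2 ∈ met
    · simp only [hm, if_pos]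
      rw [ih hP' met hap]
      have hcg : ∀ g ∈ pvNews rest met, pvF rest g = pvF (p :: rest) g := by
        intro g hg
        have hne : g ≠ p.2 := fun h => ((pvNews_mem rest met g).1 hg).2 (h ▸ hm)
        unfold pvF pvMax?
        rw [List.foldl_cons]
        simp only [pvStepM, if_neg (Ne.symm hne)]
      rw [List.map_congr_left hcg]
    · simp only [hm, if_neg, not_false_iff]
      rw [ih hP' (met ++ [p.2]) (hap + p.1)]
      rw [List.map_cons, List.sum_cons]
      have hmemp : (p.1, p.2) ∈ p :: rest := by
        rw [Prod.mk.eta]; exact List.mem_cons_self ..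
      have hisM : pvIsMax (p :: rest) p.2 p.1 := by
        refine ⟨hmemp, ?_⟩
        intro q hq hq2
        rcases List.mem_cons.1 hq with rfl | hq'
        · exact le_refl _
        · exact hhd q hq'
      have hFp : pvF (p :: rest) p.2 = p.1 := by
        unfold pvF
        rw [pvIsMax_max? hisM]
        rfl
      rw [hFp]
      have hcg : ∀ g ∈ pvNews rest (met ++ [p.2]), pvF rest g = pvF (p :: rest) g := by
        intro g hg
        have hne : g ≠ p.2 := fun h =>
          ((pvNews_mem rest (met ++ [p.2]) g).1 hg).2 (by simp [h])
        unfold pvF pvMax?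
        rw [List.foldl_cons]
        simp only [pvStepM, if_neg (Ne.symm hne)]
      rw [List.map_congr_left hcg]
      ring

-- the comprehension [(h[i], s[i]) for i in range(len(h))] is zip h s when len h ≤ len s
lemma pvPairs_eq_zip (h_ : List Int) (s : List String) (hle : h_.length ≤ s.length) :
    (PySem.List.pyRange 0 (PySem.List.len h_) 1).map
      (fun i => (PySem.List.pyGetD h_ i 0, PySem.List.pyGetD s i "")) = h_.zip s := by
  show (PySem.List.pyRange 0 (h_.length : Int) 1).map _ = _
  rw [PySem.List.pyRange_zero_nat, List.map_map]
  apply List.ext_getElem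
  · simp [Nat.min_eq_left hle]
  · intro k hk1 hk2
    simp only [List.getElem_map, List.getElem_range, Function.comp_apply,
      PySem.List.pyGetD_natCast, List.getElem_zip]
    have hk : k < h_.length := by simpa using hk1
    rw [List.getD_eq_getElem h_ 0 hk, List.getD_eq_getElem s "" (lt_of_lt_of_le hk hle)]

-- ===== VERDICT (by name: the statement is the Claim_ definition above) =====
theorem maxHappiness_spec : Claim_equal_maxHappiness := by
  intro h_ s _ hpre
  have hpairs := pvPairs_eq_zip h_ s hpre
  set L := h_.zip s with hL
  set SL := PySem.List.sorted L (fun x => x.1) true with hSLdef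
  have hlenL : L.length = h_.length := by
    rw [hL, List.length_zip, Nat.min_eq_left hpre]
  have hlen : PySem.List.len h_ = ((SL.length : Nat) : Int) := by
    rw [hSLdef, PySem.List.length_sorted, hlenL]
    rfl
  have hA : maxHappiness h_ s
      = (SL.foldl (fun (st : List String × Int) p =>
          if p.2 ∈ st.1 then st else (st.1 ++ [p.2], st.2 + p.1)) (([] : List String), (0 : Int))).2 := by
    simp only [maxHappiness]
    rw [hpairs, ← hSLdef, hlen]
    rw [PySem.List.foldl_pyRange_zero_pyGetD' SL ((0 : Int), "")
      (fun (st : List String × Int) p => if p.2 ∈ st.1 then st else (st.1 ++ [p.2], st.2 + p.1))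
      (([] : List String), (0 : Int))]
  have hB : maxHappiness_alt h_ s = ((PySem.Set.ofList (L.map (·.2))).map (pvF L)).sum := by
    simp only [maxHappiness_alt]
    rw [← hL, pvB_sum L]
  unfold Spec_maxHappiness
  rw [hA, hB, pvA_loop SL (PySem.List.sorted_pairwise_rev L (fun x => x.1)) [] 0, zero_add]
  have hperm : SL.Perm L := PySem.List.sorted_perm L (fun x => x.1) true
  have hFeq : ∀ g ∈ pvNews SL [], pvF SL g = pvF L g := by
    intro g _
    unfold pvF
    rw [pvMax?_perm hperm]
  have hpermKeys : (pvNews SL []).Perm (PySem.Set.ofList (L.map (·.2))) := by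
    rw [List.perm_ext_iff_of_nodup (pvNews_nodup SL []) (PySem.Set.nodup_ofList _)]
    intro g
    rw [pvNews_mem, PySem.Set.mem_ofList]
    simp [(hperm.map (·.2)).mem_iff]
  rw [List.map_congr_left hFeq]
  exact (hpermKeys.map (pvF L)).sum_eq
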